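-- pv_equiv track=rewrite | github.com/ssMinji/netaiops | workshop-module-1/agentcore-reference/prerequisite/lambda-cloudwatch/utils.py | filter_by_prefixes
-- ===== SOURCE A (Python) =====
-- def filter_by_prefixes(target_set: set, prefix_list: set) -> bool:
--     """Check if any of the strings in target_set starts with any prefix in prefix_list.
--
--     Args:
--         target_set: Set of strings to check
--         prefix_list: Set of prefixes to check against
--
--     Returns:
--         True if any string in target_set starts with any prefix in prefix_list
--     """
--     if not prefix_list:
--         return False
--
--     for target in target_set:
--         for prefix in prefix_list:
--             if target.startswith(prefix):
--                 return True
--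
--     return False
-- ===== SOURCE B (Python) =====
-- def filter_by_prefixes(target_set: set, prefix_list: set) -> bool:
--     """Hash-set of prefixes; for each target, look up each of its own prefixes in that set."""
--     prefixes = set(prefix_list)
--     for target in target_set:
--         for k in range(len(target) + 1):
--             if target[:k] in prefixes:
--                 return True
--     return False
-- ===== Notes on version B (the rewrite author's own statement) =====
-- stated objective: alternative
-- what changed: Instead of testing every (target, prefix) pair with startswith, B builds a hash set of the prefixes once and, for each target, looks up each of the target's own prefixes target[:k] in that set, removing the inner scan over prefix_list; it trades the O(n*m*L) pair scan for O(m*L + n*L^2) hashed lookups, which was not measurably faster on the benchmark inputs.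
import Mathlib
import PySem

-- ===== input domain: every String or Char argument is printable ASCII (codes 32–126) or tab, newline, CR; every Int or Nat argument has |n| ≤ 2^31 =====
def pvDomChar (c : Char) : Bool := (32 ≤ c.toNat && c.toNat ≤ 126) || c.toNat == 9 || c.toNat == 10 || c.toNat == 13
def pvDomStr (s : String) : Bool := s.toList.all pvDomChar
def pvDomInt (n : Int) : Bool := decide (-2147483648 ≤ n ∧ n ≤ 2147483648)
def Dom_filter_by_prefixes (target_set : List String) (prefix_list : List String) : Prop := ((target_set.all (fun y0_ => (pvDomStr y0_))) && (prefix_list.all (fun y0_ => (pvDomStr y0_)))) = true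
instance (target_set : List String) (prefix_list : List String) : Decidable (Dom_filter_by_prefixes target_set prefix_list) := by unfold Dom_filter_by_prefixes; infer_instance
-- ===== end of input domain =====

-- B replaces A's nested scan over all (target, prefix) pairs by a hash set of the prefixes
-- looked up once per prefix of each target (objective: alternative algorithm, similar cost).

-- ===== PORT A =====
-- literal port: 'if not prefix_list: return False', then the nested loops with early return
def filter_by_prefixes (target_set : List String) (prefix_list : List String) : Bool :=
  if prefix_list = [] then false
  else target_set.any (fun target => prefix_list.any (fun pfx => PySem.Str.startswith target pfx))

-- ===== PORT B =====
-- literal port of Source B: prefixes = set(prefix_list); for target: for k in range(len(target)+1): if target[:k] in prefixes: return True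
def filter_by_prefixes_alt (target_set : List String) (prefix_list : List String) : Bool :=
  let prefixes : PySem.Set String := PySem.Set.ofList prefix_list
  target_set.any (fun target =>
    (PySem.List.pyRange 0 (PySem.Str.len target + 1) 1).any (fun k =>
      PySem.Set.contains prefixes (PySem.Str.slice target none (some k))))

-- ===== PRECONDITION & SPEC =====
def Spec_filter_by_prefixes (target_set : List String) (prefix_list : List String) (out : Bool) : Prop := out = filter_by_prefixes_alt target_set prefix_list
instance (target_set : List String) (prefix_list : List String) (out : Bool) : Decidable (Spec_filter_by_prefixes target_set prefix_list out) := by unfold Spec_filter_by_prefixes; infer_instance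

-- ===== CLAIM (what is proved, stated in full; the proofs are below) =====
def Claim_equal_filter_by_prefixes : Prop := ∀ (target_set : List String) (prefix_list : List String), Dom_filter_by_prefixes target_set prefix_list → Spec_filter_by_prefixes target_set prefix_list (filter_by_prefixes target_set prefix_list)

-- ===== LEMMAS AND PROOFS =====

-- per-target: scanning the prefix list with startswith = looking up each prefix of the target in the set
theorem pv_inner (t : String) (ps : List String) :
    (PySem.List.pyRange 0 (PySem.Str.len t + 1) 1).any (fun k =>
        PySem.Set.contains (PySem.Set.ofList ps) (PySem.Str.slice t none (some k)))
      = ps.any (fun p => PySem.Str.startswith t p) := by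
  rw [Bool.eq_iff_iff]
  simp only [List.any_eq_true, PySem.Set.contains_iff, PySem.Set.mem_ofList,
    PySem.List.mem_pyRange_one, PySem.Str.startswith_eq, PySem.Chars.startswith_iff]
  constructor
  · rintro ⟨k, ⟨hk0, _⟩, hmem⟩
    refine ⟨_, hmem, ?_⟩
    have : (PySem.Str.slice t none (some k)).toList = t.toList.take k.toNat := by
      simp [PySem.Str.toList_slice, PySem.List.slice_to t.toList hk0]
    rw [this]
    exact List.take_prefix _ _
  · rintro ⟨p, hp, hpre⟩
    refine ⟨(p.toList.length : Int), ⟨by positivity, ?_⟩, ?_⟩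
    · have := hpre.length_le
      simp only [PySem.Str.len_eq]
      omega
    · have htake : t.toList.take p.toList.length = p.toList :=
        (List.prefix_iff_eq_take.mp hpre).symm
      have hsl : (PySem.Str.slice t none (some (p.toList.length : Int))).toList = p.toList := by
        rw [PySem.Str.toList_slice]
        simp only [PySem.Chars.slice_eq_listSlice]
        rw [PySem.List.slice_to t.toList (by positivity)]
        simpa using htake
      have hs : PySem.Str.slice t none (some (p.toList.length : Int)) = p :=
        String.toList_injective hsl   -- equal character lists => equal strings
      rw [hs]; exact hp

-- ===== VERDICT (by name: the statement is the Claim_ definition above) =====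
theorem filter_by_prefixes_spec : Claim_equal_filter_by_prefixes := by
  intro target_set prefix_list _
  unfold Spec_filter_by_prefixes filter_by_prefixes filter_by_prefixes_alt
  simp only [pv_inner]
  split_ifs with h
  · subst h; simp
  · rfl
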